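-- pv_equiv track=rewrite | github.com/akshayrana1139/DS-Algorithms-Java | #3 Random/Google Coding - 1.py | solution
-- ===== SOURCE A (Python) =====
-- def solution(A):
--   """Your solution goes here."""
--   dic = {}
--   for room in A:
--     if room[0] == "+":
--       if room[1:3] not in dic:
--         dic[room[1:3]] = 0
--       dic[room[1:3]] += 1
--
--   main_val = 0; rooms = []
--   for key,val in dic.items():
--     if val > main_val:
--       main_val = val
--       rooms = [key]
--     elif val == main_val:
--       rooms.append(key)
--   return min(rooms)
-- ===== SOURCE B (Python) =====
-- def solution(A):
--   """Your solution goes here."""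
--   ks = sorted(room[1:3] for room in A if room[0] == "+")
--   best = ks[0]; best_n = 0
--   run = ks[0]; run_n = 0
--   for k in ks:
--     if k == run:
--       run_n += 1
--     else:
--       run = k; run_n = 1
--     if run_n > best_n:
--       best = run; best_n = run_n
--   return best
-- ===== Notes on version B (the rewrite author's own statement) =====
-- stated objective: alternative
-- what changed: B replaces A's hash-count dict plus running-max/tie-list/min selection by a sort-then-scan algorithm: it sorts the 2-char keys of '+' entries and finds the most frequent key in one run-length scan, where the strict '>' update automatically keeps the lexicographically smallest key of maximal frequency.
import Mathlib
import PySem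

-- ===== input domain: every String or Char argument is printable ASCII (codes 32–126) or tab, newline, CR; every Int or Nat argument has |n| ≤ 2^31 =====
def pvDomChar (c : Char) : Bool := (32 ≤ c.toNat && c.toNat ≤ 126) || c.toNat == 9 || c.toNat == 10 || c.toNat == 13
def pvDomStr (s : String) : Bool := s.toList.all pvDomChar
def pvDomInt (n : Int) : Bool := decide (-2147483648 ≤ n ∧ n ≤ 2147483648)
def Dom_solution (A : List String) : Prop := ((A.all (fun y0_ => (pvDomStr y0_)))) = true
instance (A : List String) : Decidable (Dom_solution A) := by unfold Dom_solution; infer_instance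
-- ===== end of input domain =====

-- B replaces A's dict counting plus running-max/tie-list/min selection by sort-then-scan:
-- sort the keys and find the most frequent one in a single run-length pass; alternative, same task.

-- ===== PORT A =====
-- room[1:3]
def pvKey (room : String) : String := PySem.Str.slice room (some 1) (some 3)
-- room[0] == "+"  (pyGet? is none exactly where Python raises IndexError; excluded by Pre_)
def pvIsPlus (room : String) : Bool := PySem.Str.pyGet? room 0 == some '+'
-- A's counting loop body: if key not in dic: dic[key] = 0; dic[key] += 1
def pvStepA (d : PySem.Dict String Int) (room : String) : PySem.Dict String Int :=
  if pvIsPlus room then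
    let d1 := if d.contains (pvKey room) then d else d.insert (pvKey room) 0
    d1.insert (pvKey room) (d1.getD (pvKey room) 0 + 1)
  else d
-- A's selection loop body over dic.items()
def pvStepSel (s : Int × List String) (kv : String × Int) : Int × List String :=
  if kv.2 > s.1 then (kv.2, [kv.1])
  else if kv.2 == s.1 then (s.1, s.2 ++ [kv.1])
  else s
def solution (A : List String) : String :=
  let dic := A.foldl pvStepA PySem.Dict.empty
  let st := dic.items.foldl pvStepSel ((0 : Int), ([] : List String))
  -- min(rooms); none exactly where Python raises ValueError on an empty rooms list; excluded by Pre_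
  (PySem.List.min? st.2 (fun x => x)).getD ""

-- ===== PORT B =====
-- B's loop body: extend or start the current run, then take it as best on a strict improvement
def pvStepRun (s : String × Int × String × Int) (k : String) : String × Int × String × Int :=
  let run' := if k == s.2.2.1 then s.2.2.1 else k
  let runn' := if k == s.2.2.1 then s.2.2.2 + 1 else 1
  if runn' > s.2.1 then (run', runn', run', runn') else (s.1, s.2.1, run', runn')
def solution_alt (A : List String) : String :=
  let ks := PySem.List.sorted ((A.filter pvIsPlus).map pvKey) (fun x => x) false
  -- ks[0]; none exactly where Python raises IndexError on an empty ks; excluded by Pre_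
  let k0 := (PySem.List.pyGet? ks 0).getD ""
  (ks.foldl pvStepRun (k0, (0 : Int), k0, (0 : Int))).1

-- ===== PRECONDITION & SPEC =====
-- Pre_ excludes exactly the inputs where Python A raises: an empty string (IndexError on
-- room[0]) or no room starting with '+' (ValueError from min over an empty sequence).
def Pre_solution (A : List String) : Prop :=
  (∀ s ∈ A, s.toList ≠ []) ∧ (∃ s ∈ A, s.toList.head? = some '+')
instance (A : List String) : Decidable (Pre_solution A) := by unfold Pre_solution; infer_instance
def pvWitness_solution : List String := ["+1a", "+1a", "+2b", "-1a"]
def Spec_solution (A : List String) (out : String) : Prop := out = solution_alt A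
instance (A : List String) (out : String) : Decidable (Spec_solution A out) := by unfold Spec_solution; infer_instance

-- ===== CLAIM (what is proved, stated in full; the proofs are below) =====
def Claim_equal_solution : Prop := ∀ (A : List String), Dom_solution A → Pre_solution A → Spec_solution A (solution A)

-- ===== LEMMAS AND PROOFS =====

-- A's counting body equals the plain counter step
theorem pvStepA_eq (d : PySem.Dict String Int) (room : String) :
    pvStepA d room = if pvIsPlus room then d.insert (pvKey room) (d.getD (pvKey room) 0 + 1) else d := by
  unfold pvStepA
  by_cases hp : pvIsPlus room
  · simp only [hp, if_true]
    by_cases h : d.contains (pvKey room)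
    · simp [h]
    · simp only [h, Bool.false_eq_true, if_false]
      rw [PySem.Dict.getD_insert_self, PySem.Dict.insert_insert_self]
      have : d.getD (pvKey room) 0 = 0 := by
        simp [PySem.Dict.getD_of_not_contains, h]
      rw [this]
  · simp [hp]

-- the running maximum of A's selection loop
def pvMx (ks : List String) (c : String → Int) : Int := ks.foldl (fun m k => max m (c k)) 0

-- A's selection loop computes the maximum and the keys attaining it, in order
theorem pvAstate (c : String → Int) (ks : List String)
    (hpos : ∀ k ∈ ks, 1 ≤ c k) (hne : ks ≠ []) :
    (ks.map (fun k => (k, c k))).foldl pvStepSel ((0 : Int), ([] : List String))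
      = (pvMx ks c, ks.filter (fun k => c k == pvMx ks c)) := by
  induction ks using List.reverseRecOn with
  | nil => exact absurd rfl hne
  | append_singleton ks k ih =>
    have hposk : 1 ≤ c k := hpos k (by simp)
    have hMx : pvMx (ks ++ [k]) c = max (pvMx ks c) (c k) := by
      simp [pvMx, List.foldl_append]
    rcases eq_or_ne ks [] with hksnil | hksne
    · subst hksnil
      have h0 : (0:Int) < c k := by omega
      simp only [List.nil_append, List.map_cons, List.map_nil, List.foldl_cons, List.foldl_nil]
      rw [show pvStepSel (0, []) (k, c k) = (c k, [k]) by simp [pvStepSel, h0]]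
      have hMx1 : pvMx [k] c = c k := by simp [pvMx]; omega
      simp [hMx1]
    · have hposks : ∀ x ∈ ks, 1 ≤ c x := fun x hx => hpos x (by simp [hx])
      have hub := PySem.List.le_foldl_max_int ks c 0
      rw [List.map_append, List.foldl_append, ih hposks hksne]
      simp only [List.map_cons, List.map_nil, List.foldl_cons, List.foldl_nil]
      rcases lt_trichotomy (pvMx ks c) (c k) with hlt | heq | hgt
      · have : pvStepSel (pvMx ks c, ks.filter (fun k' => c k' == pvMx ks c)) (k, c k)
            = (c k, [k]) := by simp [pvStepSel, hlt]
        rw [this, hMx, max_eq_right hlt.le]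
        have hfil : ks.filter (fun k' => c k' == c k) = [] := by
          rw [List.filter_eq_nil_iff]
          intro x hx
          simp only [beq_iff_eq]
          exact ne_of_lt (lt_of_le_of_lt (hub.2 x hx) hlt)
        rw [List.filter_append, hfil]
        simp
      · have : pvStepSel (pvMx ks c, ks.filter (fun k' => c k' == pvMx ks c)) (k, c k)
            = (pvMx ks c, ks.filter (fun k' => c k' == pvMx ks c) ++ [k]) := by
          simp [pvStepSel, heq]
        rw [this, hMx, max_eq_left heq.ge, List.filter_append]
        simp [heq]
      · have : pvStepSel (pvMx ks c, ks.filter (fun k' => c k' == pvMx ks c)) (k, c k)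
            = (pvMx ks c, ks.filter (fun k' => c k' == pvMx ks c)) := by
          simp only [pvStepSel]
          rw [if_neg (by omega), if_neg (by simp; omega)]
        rw [this, hMx, max_eq_left hgt.le, List.filter_append]
        have hfil : [k].filter (fun k' => c k' == pvMx ks c) = [] := by
          simp; omega
        rw [hfil, List.append_nil]

-- the invariant of B's run-length scan over a sorted prefix p:
-- (run, run_n) is the maximal element and its count, (best, best_n) the most frequent
-- key (smallest on ties) and its count
def pvInv (p : List String) (st : String × Int × String × Int) : Prop :=
  st.2.2.1 ∈ p ∧ st.2.2.2 = (p.count st.2.2.1 : Int) ∧ (∀ y ∈ p, y ≤ st.2.2.1) ∧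
  st.1 ∈ p ∧ st.2.1 = (p.count st.1 : Int) ∧ (∀ y ∈ p, (p.count y : Int) ≤ st.2.1) ∧
  (∀ y ∈ p, p.count y = p.count st.1 → st.1 ≤ y)

theorem pvInv_mk (p : List String) (b bn r rn) : pvInv p (b, bn, r, rn) ↔
    (r ∈ p ∧ rn = (p.count r : Int) ∧ (∀ y ∈ p, y ≤ r) ∧
     b ∈ p ∧ bn = (p.count b : Int) ∧ (∀ y ∈ p, (p.count y : Int) ≤ bn) ∧
     (∀ y ∈ p, p.count y = p.count b → b ≤ y)) := Iff.rfl

theorem pvStepRun_inv (p : List String) (k : String) (st : String × Int × String × Int)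
    (h : pvInv p st) (hk : ∀ y ∈ p, y ≤ k) : pvInv (p ++ [k]) (pvStepRun st k) := by
  obtain ⟨b, bn, r, rn⟩ := st
  rw [pvInv_mk] at h
  obtain ⟨hrmem, hrc, hrmax, hbmem, hbc, hbub, hbmin⟩ := h
  have hmem' : ∀ y ∈ p ++ [k], y = k ∨ y ∈ p := by
    intro y hy
    rcases List.mem_append.mp hy with h' | h'
    · exact Or.inr h'
    · exact Or.inl (by simpa using h')
  have hcnt : ∀ y : String, (p ++ [k]).count y = p.count y + if y = k then 1 else 0 := by
    intro y; rw [List.count_append]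
    by_cases h : y = k
    · simp [h]
    · simp [List.count_eq_zero, h]
  have hbpos : 1 ≤ (p.count b : Int) := by
    have := List.count_pos_iff.mpr hbmem; omega
  by_cases hkr : k = r
  · -- extend the current run
    subst hkr
    have hrun' : (p ++ [k]).count k = p.count k + 1 := by rw [hcnt]; simp
    by_cases hgt : rn + 1 > bn
    · have hstep : pvStepRun (b, bn, k, rn) k = (k, rn + 1, k, rn + 1) := by
        simp [pvStepRun, hgt]
      rw [hstep, pvInv_mk]
      have hc' : rn + 1 = ((p ++ [k]).count k : Int) := by
        rw [hrun']; push_cast; omega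
      refine ⟨by simp, hc', ?_, by simp, hc', ?_, ?_⟩
      · intro y hy
        rcases hmem' y hy with h' | h'
        · exact le_of_eq h'
        · exact hrmax y h'
      · intro y hy
        by_cases hyk : y = k
        · subst hyk; rw [← hc']
        · rw [hcnt y, if_neg hyk]
          have hym : y ∈ p := (hmem' y hy).resolve_left hyk
          have := hbub y hym
          push_cast
          omega
      · intro y hy hcy
        by_cases hyk : y = k
        · exact le_of_eq hyk.symm
        · exfalso
          rw [hcnt y, if_neg hyk, hrun'] at hcy
          have hym : y ∈ p := (hmem' y hy).resolve_left hyk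
          have h1 := hbub y hym
          omega
    · have hstep : pvStepRun (b, bn, k, rn) k = (b, bn, k, rn + 1) := by
        simp [pvStepRun, hgt]
      rw [hstep, pvInv_mk]
      have hbk : b ≠ k := by
        intro hbk
        rw [hbk] at hbc
        omega
      have hc' : rn + 1 = ((p ++ [k]).count k : Int) := by
        rw [hrun']; push_cast; omega
      refine ⟨by simp, hc', ?_, by simp [hbmem], ?_, ?_, ?_⟩
      · intro y hy
        rcases hmem' y hy with h' | h'
        · exact le_of_eq h'
        · exact hrmax y h'
      · rw [hcnt b, if_neg hbk, hbc]; simp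
      · intro y hy
        by_cases hyk : y = k
        · subst hyk; rw [← hc']; omega
        · rw [hcnt y, if_neg hyk]
          have hym : y ∈ p := (hmem' y hy).resolve_left hyk
          have := hbub y hym
          omega
      · intro y hy hcy
        rw [hcnt y, hcnt b, if_neg hbk] at hcy
        by_cases hyk : y = k
        · rw [hyk]; exact hk b hbmem
        · rw [if_neg hyk] at hcy
          exact hbmin y ((hmem' y hy).resolve_left hyk) (by omega)
  · -- start a new run with k; k is fresh, so its count is 1 ≤ best_n
    have hknp : k ∉ p := by
      intro hkp
      exact hkr (le_antisymm (hrmax k hkp) (hk r hrmem))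
    have hck : p.count k = 0 := List.count_eq_zero.mpr hknp
    have hbk : b ≠ k := fun h => hknp (h ▸ hbmem)
    have hstep : pvStepRun (b, bn, r, rn) k = (b, bn, k, 1) := by
      have h1 : ¬ (k == r) = true := by simpa using hkr
      have h2 : ¬ ((1:Int) > bn) := by rw [hbc]; omega
      simp only [pvStepRun, h1, Bool.false_eq_true, if_false, h2]
    rw [hstep, pvInv_mk]
    have hck' : ((p ++ [k]).count k : Int) = 1 := by rw [hcnt k]; simp [hck]
    refine ⟨by simp, by rw [hck'], ?_, by simp [hbmem], ?_, ?_, ?_⟩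
    · intro y hy
      rcases hmem' y hy with h' | h'
      · exact le_of_eq h'
      · exact hk y h'
    · rw [hcnt b, if_neg hbk, hbc]; simp
    · intro y hy
      by_cases hyk : y = k
      · subst hyk; rw [← Nat.cast_inj (R := Int)] at *; rw [hck']; omega
      · rw [hcnt y, if_neg hyk]
        have hym : y ∈ p := (hmem' y hy).resolve_left hyk
        have := hbub y hym
        omega
    · intro y hy hcy
      rw [hcnt y, hcnt b, if_neg hbk] at hcy
      by_cases hyk : y = k
      · rw [hyk]; exact hk b hbmem
      · rw [if_neg hyk] at hcy
        exact hbmin y ((hmem' y hy).resolve_left hyk) (by omega)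

-- the fold satisfies the invariant on any nonempty sorted list, for any initial strings
theorem pvBinv (p : List String) (hs : p.Pairwise (fun a b => a ≤ b)) (hne : p ≠ [])
    (b0 h0 : String) : pvInv p (p.foldl pvStepRun (b0, 0, h0, 0)) := by
  induction p using List.reverseRecOn with
  | nil => exact absurd rfl hne
  | append_singleton p k ih =>
    have hsp : p.Pairwise (fun a b => a ≤ b) := (List.pairwise_append.mp hs).1
    have hk : ∀ y ∈ p, y ≤ k := by
      intro y hy
      exact (List.pairwise_append.mp hs).2.2 y hy k (by simp)
    rcases eq_or_ne p [] with hp | hp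
    · subst hp
      simp only [List.nil_append, List.foldl_cons, List.foldl_nil]
      have hstep : pvStepRun (b0, 0, h0, 0) k = (k, 1, k, 1) := by
        by_cases hkh : k = h0 <;> simp [pvStepRun, hkh]
      rw [hstep, pvInv_mk]
      refine ⟨by simp, by simp, by simp, by simp, by simp, ?_, ?_⟩
      · intro y hy; simp at hy; simp [hy]
      · intro y hy _; simp at hy; simp [hy]
    · rw [List.foldl_append]
      exact pvStepRun_inv p k _ (ih hsp hp) hk

-- ===== VERDICT (by name: the statement is the Claim_ definition above) =====
theorem solution_spec : Claim_equal_solution := by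
  intro A _ hpre
  unfold Spec_solution solution solution_alt
  -- shared data
  set xs := (A.filter pvIsPlus).map pvKey with hxs
  -- A's dict is Counter(xs)
  have hcnt : A.foldl pvStepA PySem.Dict.empty = PySem.Dict.counter xs := by
    calc A.foldl pvStepA PySem.Dict.empty
        = A.foldl (fun d room => if pvIsPlus room then d.insert (pvKey room) (d.getD (pvKey room) 0 + 1) else d) PySem.Dict.empty := by
          exact List.foldl_ext _ _ _ (fun d room _ => pvStepA_eq d room)
      _ = (A.filter pvIsPlus).foldl (fun d room => d.insert (pvKey room) (d.getD (pvKey room) 0 + 1)) PySem.Dict.empty :=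
          PySem.List.foldl_if_eq_foldl_filter pvIsPlus _ A PySem.Dict.empty
      _ = xs.foldl (fun d x => d.insert x (d.getD x 0 + 1)) PySem.Dict.empty := by
          rw [hxs, List.foldl_map]
      _ = PySem.Dict.counter xs := PySem.Dict.foldl_insert_getD_add_one_eq_counter _
  rw [hcnt]
  -- xs is nonempty
  have hxsne : xs ≠ [] := by
    obtain ⟨s, hsA, hshead⟩ := hpre.2
    have hplus : pvIsPlus s = true := by
      unfold pvIsPlus
      have : PySem.Str.pyGet? s ((0 : Nat) : Int) = s.toList[(0:Nat)]? := PySem.Str.pyGet?_natCast s 0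
      simp only [Nat.cast_zero] at this
      rw [this, ← List.head?_eq_getElem?, hshead]
      rfl
    exact List.ne_nil_of_mem (List.mem_map_of_mem (List.mem_filter.mpr ⟨hsA, hplus⟩))
  -- A side: reduce to max/filter over the distinct keys
  simp only [PySem.Dict.items_counter]
  set kset := PySem.Set.ofList xs with hkset
  set c : String → Int := fun k => ((xs.count k : Nat) : Int) with hc
  have hpos : ∀ k ∈ kset, 1 ≤ c k := by
    intro k hk
    have : k ∈ xs := (PySem.Set.mem_ofList _ _).mp hk
    have := List.count_pos_iff.mpr this
    simp only [hc]; omega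
  have hksetne : kset ≠ [] := by
    obtain ⟨x, hx⟩ := List.exists_mem_of_ne_nil xs hxsne
    exact List.ne_nil_of_mem ((PySem.Set.mem_ofList _ _).mpr hx)
  rw [pvAstate c kset hpos hksetne]
  have hub := PySem.List.le_foldl_max_int kset c 0
  -- the maximum is attained
  obtain ⟨k0, hk0mem, hk0⟩ : ∃ k0 ∈ kset, c k0 = pvMx kset c := by
    have hmm : (kset.map c).foldl max 0 = 0 ∨ (kset.map c).foldl max 0 ∈ kset.map c :=
      PySem.List.foldl_max_mem (kset.map c) 0
    rw [List.foldl_map] at hmm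
    rcases hmm with h0 | hm
    · obtain ⟨k1, hk1⟩ := List.exists_mem_of_ne_nil kset hksetne
      have := hpos k1 hk1
      have := hub.2 k1 hk1
      have : pvMx kset c = kset.foldl (fun m k => max m (c k)) 0 := rfl
      omega
    · obtain ⟨k0, hk0m, hk0e⟩ := List.mem_map.mp hm
      exact ⟨k0, hk0m, hk0e⟩
  have hk0fil : k0 ∈ kset.filter (fun k => c k == pvMx kset c) :=
    List.mem_filter.mpr ⟨hk0mem, by simp [hk0]⟩
  obtain ⟨r, hr⟩ : ∃ r, PySem.List.min? (kset.filter (fun k => c k == pvMx kset c)) (fun x => x) = some r := by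
    cases h : PySem.List.min? (kset.filter (fun k => c k == pvMx kset c)) (fun x => x) with
    | none =>
      rw [PySem.List.min?_eq_none_iff] at h
      rw [h] at hk0fil
      simp at hk0fil
    | some r => exact ⟨r, rfl⟩
  rw [hr]
  simp only [Option.getD_some]
  have hrfil := PySem.List.min?_mem hr
  obtain ⟨hrks, hrc⟩ := List.mem_filter.mp hrfil
  have hrc : c r = pvMx kset c := by simpa using hrc
  have hrmin := PySem.List.min?_isMin hr
  -- B side: the run scan over the sorted keys
  set ks := PySem.List.sorted xs (fun x => x) false with hks
  have hperm : ks.Perm xs := PySem.List.sorted_perm xs (fun x => x) false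
  have hksne : ks ≠ [] := by
    intro h
    apply hxsne
    have := hperm.symm
    rw [h] at this
    exact this.eq_nil
  have hsorted : ks.Pairwise (fun a b => a ≤ b) := PySem.List.sorted_pairwise xs (fun x => x)
  obtain ⟨hbr_mem, hbr_c, hbr_max, hb_mem, hb_c, hb_ub, hb_min⟩ :=
    pvBinv ks hsorted hksne ((PySem.List.pyGet? ks 0).getD "") ((PySem.List.pyGet? ks 0).getD "")
  set st := ks.foldl pvStepRun (((PySem.List.pyGet? ks 0).getD ""), (0:Int), ((PySem.List.pyGet? ks 0).getD ""), (0:Int)) with hst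
  set b := st.1 with hb
  -- counts over ks and xs agree
  have hcount : ∀ y : String, ks.count y = xs.count y := fun y => hperm.count_eq y
  -- b and r attain the same (maximal) count
  have hbxs : b ∈ xs := hperm.mem_iff.mp hb_mem
  have hbkset : b ∈ kset := (PySem.Set.mem_ofList _ _).mpr hbxs
  have hrxs : r ∈ xs := (PySem.Set.mem_ofList _ _).mp hrks
  have hrksmem : r ∈ ks := hperm.mem_iff.mpr hrxs
  have h2 : c r ≤ c b := by
    have h := hb_ub r hrksmem
    rw [hb_c, hcount r, hcount b] at h
    exact h
  have hceq : c b = c r := by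
    have h3 : c b ≤ c r := by rw [hrc]; exact hub.2 b hbkset
    exact le_antisymm h3 h2
  -- minimality both ways
  have h1 : r ≤ b := by
    apply hrmin b
    exact List.mem_filter.mpr ⟨hbkset, by simp [hceq.trans hrc]⟩
  have h2' : b ≤ r := by
    apply hb_min r hrksmem
    have h := hceq
    simp only [hc] at h
    rw [hcount r, hcount b]
    omega
  exact le_antisymm h1 h2'
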